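-- pv_equiv track=rewrite | github.com/yinkaisheng/Python-UIAutomation-for-Windows | rename_pdf_bookmark.py | Rename1
-- ===== SOURCE A (Python) =====
-- Punctuation = '!"\',:;?)'  # '!"\',.:;?)'
--
-- def Rename1(name, removeChapter = True):
--     newName = name.strip().replace('‘', '\'').replace('’', '\'').replace('“', '"').replace('”', '"')
--     #newName = newName.replace('.', ' ')
--     #newName = newName.replace('_ _', '__')
--     #newName = newName.replace('_  _', '__')
--     words = newName.split()
--     if len(words) == 0:
--         return ''
--     if removeChapter and words[0].lower() == 'chapter' and len(words) > 2:
--         del words[0]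
--     i = 0
--     while i < len(words):
--         if words[i][0] in Punctuation:
--             if i > 0:
--                 if not (words[i][0] in '"\'' and len(words[i]) > 1):
--                     words[i-1] += words[i]
--                     del words[i]
--                     i -= 1
--                     continue
--         i += 1
--     newName = ' '.join(words)
--     return newName
-- ===== SOURCE B (Python) =====
-- Punctuation = '!"\',:;?)'
--
-- def Rename1(name, removeChapter = True):
--     newName = name.strip().replace('\u2018', '\'').replace('\u2019', '\'').replace('\u201c', '"').replace('\u201d', '"')
--     words = newName.split()
--     if not words:
--         return ''
--     if removeChapter and words[0].lower() == 'chapter' and len(words) > 2: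
--         words = words[1:]
--     result = []
--     for w in words:
--         if w[0] in Punctuation and not (w[0] in '"\'' and len(w) > 1) and result:
--             result[-1] += w
--         else:
--             result.append(w)
--     return ' '.join(result)
-- ===== Notes on version B (the rewrite author's own statement) =====
-- stated objective: simpler
-- what changed: Replaced A's in-place while loop that mutates the word list with del and i-=1 backtracking by a single forward pass that folds each word into a new result list, merging a punctuation-led word into the last result entry.
import Mathlib
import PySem

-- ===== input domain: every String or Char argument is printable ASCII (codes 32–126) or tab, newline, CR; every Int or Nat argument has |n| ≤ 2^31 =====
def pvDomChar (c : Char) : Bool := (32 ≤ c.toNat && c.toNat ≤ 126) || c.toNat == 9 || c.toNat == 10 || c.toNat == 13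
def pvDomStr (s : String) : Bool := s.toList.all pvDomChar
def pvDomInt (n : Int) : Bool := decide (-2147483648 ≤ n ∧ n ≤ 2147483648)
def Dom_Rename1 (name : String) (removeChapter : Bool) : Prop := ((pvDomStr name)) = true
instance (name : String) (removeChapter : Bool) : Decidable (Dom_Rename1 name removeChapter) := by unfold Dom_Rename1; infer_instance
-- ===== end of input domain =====

-- B replaces A's in-place while loop (merge + del + index backtracking) by a single forward pass
-- that folds each word into a result list, merging punctuation-led words into the last entry (objective: simpler).

-- ===== PORT A =====
-- Punctuation = '!"\',:;?)'
def pvPunct : List Char := ['!', '"', '\'', ',', ':', ';', '?', ')']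

-- words[i][0] in Punctuation  (words produced by split() are nonempty; [] defaults to false)
def pvStartsPunct (w : List Char) : Bool :=
  match w with
  | [] => false
  | c :: _ => pvPunct.contains c

-- words[i][0] in '"\'' and len(words[i]) > 1
def pvQuoteLong (w : List Char) : Bool :=
  match w with
  | [] => false
  | c :: rest => ['"', '\''].contains c && decide (0 < rest.length)

-- the in-place while loop of A: merge a punctuation-led word into its predecessor and step back
def pvLoopA (words : List (List Char)) (i : Nat) : List (List Char) :=
  if h : i < words.length then
    if pvStartsPunct words[i] then
      if 0 < i then
        if !(pvQuoteLong words[i]) then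
          pvLoopA ((words.set (i - 1) (words[i - 1]'(by omega) ++ words[i])).eraseIdx i) (i - 1)
        else
          pvLoopA words (i + 1)
      else
        pvLoopA words (i + 1)
    else
      pvLoopA words (i + 1)
  else
    words
termination_by words.length * 2 - i
decreasing_by
  · simp only [List.length_eraseIdx, List.length_set, h, if_true]; omega
  · omega
  · omega
  · omega

def Rename1 (name : String) (removeChapter : Bool) : String :=
  let s1 := PySem.Chars.strip name.toList
  let s2 := PySem.Chars.replace (PySem.Chars.replace (PySem.Chars.replace
              (PySem.Chars.replace s1 ['‘'] ['\'']) ['’'] ['\'']) ['“'] ['"']) ['”'] ['"']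
  match PySem.Chars.split₀ s2 with
  | [] => ""
  | w0 :: rest =>
    let words :=
      if removeChapter && (PySem.Chars.lower w0 == "chapter".toList) && decide (2 < (w0 :: rest).length)
      then rest else w0 :: rest
    String.ofList (PySem.Chars.join [' '] (pvLoopA words 0))

-- ===== PORT B =====
-- w[0] in Punctuation and not (w[0] in '"\'' and len(w) > 1)
def pvCondB (w : List Char) : Bool := pvStartsPunct w && !(pvQuoteLong w)

-- result[-1] += w
def pvAppendLast : List (List Char) → List Char → List (List Char)
  | [], _ => []
  | [x], w => [x ++ w]
  | x :: y :: xs, w => x :: pvAppendLast (y :: xs) w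

-- one iteration of B's forward pass
def pvStepB (r : List (List Char)) (w : List Char) : List (List Char) :=
  if pvCondB w && !r.isEmpty then pvAppendLast r w else r ++ [w]

def Rename1_alt (name : String) (removeChapter : Bool) : String :=
  let s1 := PySem.Chars.strip name.toList
  let s2 := PySem.Chars.replace (PySem.Chars.replace (PySem.Chars.replace
              (PySem.Chars.replace s1 ['‘'] ['\'']) ['’'] ['\'']) ['“'] ['"']) ['”'] ['"']
  match PySem.Chars.split₀ s2 with
  | [] => ""
  | w0 :: rest =>
    let words :=
      if removeChapter && (PySem.Chars.lower w0 == "chapter".toList) && decide (2 < (w0 :: rest).length)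
      then rest else w0 :: rest
    String.ofList (PySem.Chars.join [' '] (words.foldl pvStepB []))

-- ===== PRECONDITION & SPEC =====
def Spec_Rename1 (name : String) (removeChapter : Bool) (out : String) : Prop := out = Rename1_alt name removeChapter
instance (name : String) (removeChapter : Bool) (out : String) : Decidable (Spec_Rename1 name removeChapter out) := by unfold Spec_Rename1; infer_instance

-- ===== CLAIM =====
def Claim_equal_Rename1 : Prop := ∀ (name : String) (removeChapter : Bool), Dom_Rename1 name removeChapter → Spec_Rename1 name removeChapter (Rename1 name removeChapter)

-- ===== LEMMAS AND PROOFS =====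

lemma pvAppendLast_concat (as : List (List Char)) (prev w : List Char) :
    pvAppendLast (as ++ [prev]) w = as ++ [prev ++ w] := by
  induction as with
  | nil => rfl
  | cons a as ih =>
    cases as with
    | nil => rfl
    | cons b bs => simpa [pvAppendLast] using ih

lemma pvSetErase (as : List (List Char)) (prev w : List Char) (rs : List (List Char)) :
    ((as ++ prev :: w :: rs).set as.length (prev ++ w)).eraseIdx (as.length + 1)
      = as ++ (prev ++ w) :: rs := by
  induction as with
  | nil => rfl
  | cons a as ih => simpa [List.set, List.eraseIdx] using ih

lemma pvCondB_append (prev w : List Char) (h : prev ≠ []) (hc : pvCondB prev = false) :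
    pvCondB (prev ++ w) = false := by
  cases prev with
  | nil => exact absurd rfl h
  | cons c rest =>
    simp only [pvCondB, pvStartsPunct, pvQuoteLong, List.cons_append] at hc ⊢
    have hlen : decide (0 < rest.length) = true → decide (0 < (rest ++ w).length) = true := by
      simp only [decide_eq_true_eq, List.length_append]; omega
    cases hp : pvPunct.contains c <;>
      cases hq : List.contains ['"', '\''] c <;>
        cases hl : decide (0 < rest.length) <;>
          simp_all

lemma pvGetMid (as : List (List Char)) (p : List Char) (rs : List (List Char))
    (hp : as.length < (as ++ p :: rs).length) :
    (as ++ p :: rs)[as.length]'hp = p := by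
  rw [List.getElem_append_right (Nat.le_refl _)]
  simp

lemma pvGetMid1 (as : List (List Char)) (p q : List Char) (rs : List (List Char))
    (hp : as.length + 1 < (as ++ p :: q :: rs).length) :
    (as ++ p :: q :: rs)[as.length + 1]'hp = q := by
  rw [List.getElem_append_right (by simp)]
  simp

-- A's loop moves forward at index j when j = 0 or the word at j cannot merge
lemma pvStepA_forward (words : List (List Char)) (j : Nat) (h : j < words.length)
    (hc : j = 0 ∨ pvCondB words[j] = false) :
    pvLoopA words j = pvLoopA words (j + 1) := by
  rw [pvLoopA]
  simp only [h, dite_true]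
  rcases hc with rfl | hc
  · simp
  · by_cases hs : pvStartsPunct words[j] = true
    · have hq : pvQuoteLong words[j] = true := by
        simp only [pvCondB, hs, Bool.true_and, Bool.not_eq_eq_eq_not] at hc
        simpa using hc
      simp [hs, hq]
    · simp [Bool.not_eq_true] at hs
      simp [hs]

-- main invariant: A's while loop from index |acc| on acc ++ rest equals B's fold over rest with accumulator acc
lemma pvLoop_eq_fold (rest : List (List Char)) :
    ∀ acc : List (List Char),
      (∀ w ∈ rest, w ≠ []) →
      (∀ w ∈ acc, w ≠ []) →
      (∀ i : Nat, (hi : i < acc.length) → 0 < i → pvCondB acc[i] = false) →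
      pvLoopA (acc ++ rest) acc.length = rest.foldl pvStepB acc := by
  induction rest with
  | nil =>
    intro acc _ _ _
    rw [pvLoopA]
    simp
  | cons w rs ih =>
    intro acc hrest hacc hinv
    have hlen : acc.length < (acc ++ w :: rs).length := by simp
    have hget : (acc ++ w :: rs)[acc.length]'hlen = w := by
      simp
    by_cases hc : pvCondB w = true
    · -- w starts with merging punctuation
      have hcb : (pvStartsPunct w && !(pvQuoteLong w)) = true := by simpa [pvCondB] using hc
      have hsp : pvStartsPunct w = true := (Bool.and_eq_true_iff.mp hcb).1
      have hql : pvQuoteLong w = false := by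
        simpa using (Bool.and_eq_true_iff.mp hcb).2
      rcases List.eq_nil_or_concat acc with rfl | ⟨as, prev, rfl⟩
      · -- i = 0: no merge possible
        have h0 : pvLoopA ([] ++ w :: rs) 0 = pvLoopA (w :: rs) 1 := by
          apply pvStepA_forward _ 0 (by simp) (Or.inl rfl)
        rw [List.nil_append] at h0
        show pvLoopA (w :: rs) 0 = List.foldl pvStepB [] (w :: rs)
        rw [h0]
        have := ih [w] (fun x hx => hrest x (List.mem_cons_of_mem _ hx))
          (fun x hx => by
            rcases List.mem_singleton.mp hx with rfl
            exact hrest _ List.mem_cons_self)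
          (fun i hi h0i => by simp at hi; omega)
        simpa [pvStepB, hc] using this
      · -- merge: words[i-1] += words[i]; del words[i]; i -= 1; then the re-check moves forward
        simp only [List.concat_eq_append] at hacc hinv ⊢
        have hprev_ne : prev ≠ [] := hacc prev (by simp)
        have hcp0 : 0 < as.length → pvCondB prev = false := by
          intro hpos
          have := hinv as.length (by simp) hpos
          simpa [pvGetMid] using this
        rw [show as ++ [prev] ++ w :: rs = as ++ prev :: w :: rs from by simp,
            show (as ++ [prev]).length = as.length + 1 from by simp]
        rw [pvLoopA]
        rw [dif_pos (by simp : as.length + 1 < (as ++ prev :: w :: rs).length)]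
        simp only [pvGetMid, pvGetMid1, Nat.add_sub_cancel]
        rw [if_pos hsp, if_pos (Nat.zero_lt_succ _), if_pos (by rw [hql]; rfl)]
        rw [pvSetErase]
        -- re-check at index as.length moves forward
        have hcpm : 0 < as.length → pvCondB (prev ++ w) = false := fun hpos =>
          pvCondB_append prev w hprev_ne (hcp0 hpos)
        have hnext : pvLoopA (as ++ (prev ++ w) :: rs) as.length
            = pvLoopA (as ++ (prev ++ w) :: rs) (as.length + 1) := by
          apply pvStepA_forward _ as.length (by simp)
          rcases Nat.eq_zero_or_pos as.length with h0 | hpos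
          · exact Or.inl h0
          · refine Or.inr ?_
            rw [pvGetMid]
            exact hcpm hpos
        rw [hnext]
        -- apply the induction hypothesis with accumulator as ++ [prev ++ w]
        have hout := ih (as ++ [prev ++ w])
          (fun x hx => hrest x (List.mem_cons_of_mem _ hx))
          (by
            intro x hx
            rcases List.mem_append.mp hx with hx | hx
            · exact hacc x (List.mem_append.mpr (Or.inl hx))
            · rcases List.mem_singleton.mp hx with rfl
              intro habs
              exact hprev_ne (List.append_eq_nil_iff.mp habs).1)
          (by
            intro i hilt h0i
            simp only [List.length_append, List.length_singleton] at hilt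
            by_cases hias : i < as.length
            · rw [List.getElem_append_left hias]
              have := hinv i (by simp; omega) h0i
              rw [List.getElem_append_left hias] at this
              exact this
            · have hieq : i = as.length := by omega
              subst hieq
              rw [pvGetMid]
              exact hcpm h0i)
        rw [show (as ++ [prev ++ w]).length = as.length + 1 from by simp] at hout
        rw [show as ++ (prev ++ w) :: rs = (as ++ [prev ++ w]) ++ rs from by simp]
        rw [hout]
        have hstep : pvStepB (as ++ [prev]) w = as ++ [prev ++ w] := by
          simp [pvStepB, hc, pvAppendLast_concat]
        simp [List.foldl_cons, hstep]
    · -- no merge: step forward, append w to the accumulator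
      have hc' : pvCondB w = false := by simpa using hc
      have h1 : pvLoopA (acc ++ w :: rs) acc.length
          = pvLoopA (acc ++ w :: rs) (acc.length + 1) := by
        apply pvStepA_forward _ acc.length hlen
        exact Or.inr (by rw [hget]; exact hc')
      rw [h1]
      have hout := ih (acc ++ [w])
        (fun x hx => hrest x (List.mem_cons_of_mem _ hx))
        (by
          intro x hx
          rcases List.mem_append.mp hx with hx | hx
          · exact hacc x hx
          · rcases List.mem_singleton.mp hx with rfl
            exact hrest _ List.mem_cons_self)
        (by
          intro i hilt h0i
          simp only [List.length_append, List.length_singleton] at hilt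
          by_cases hias : i < acc.length
          · rw [List.getElem_append_left hias]
            exact hinv i hias h0i
          · have hieq : i = acc.length := by omega
            subst hieq
            rw [pvGetMid]
            simpa using hc')
      rw [show (acc ++ [w]).length = acc.length + 1 from by simp] at hout
      rw [show acc ++ w :: rs = (acc ++ [w]) ++ rs from by simp] at h1 ⊢
      rw [hout]
      simp [pvStepB, hc', List.foldl_cons]

-- every word produced by split() is nonempty
lemma pvSplit₀_go_ne_nil (s : List Char) :
    ∀ (cur : List Char) (acc : List (List Char)),
      (∀ w ∈ acc, w ≠ []) →
      ∀ w ∈ PySem.Chars.split₀.go s cur acc, w ≠ [] := by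
  induction s with
  | nil =>
    intro cur acc hacc w hw
    rw [PySem.Chars.split₀.go] at hw
    by_cases hcur : cur.isEmpty = true
    · rw [if_pos hcur] at hw
      exact hacc w (List.mem_reverse.mp hw)
    · rw [if_neg hcur] at hw
      rcases List.mem_cons.mp (List.mem_reverse.mp hw) with rfl | hw'
      · simp only [ne_eq, List.reverse_eq_nil_iff]
        intro habs
        exact hcur (by simp [habs])
      · exact hacc w hw'
  | cons c rest ih =>
    intro cur acc hacc w hw
    rw [PySem.Chars.split₀.go] at hw
    by_cases hsp : PySem.Chars.isspace c = true
    · rw [if_pos hsp] at hw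
      by_cases hcur : cur.isEmpty = true
      · rw [if_pos hcur] at hw
        exact ih [] acc hacc w hw
      · rw [if_neg hcur] at hw
        refine ih [] (cur.reverse :: acc) ?_ w hw
        intro x hx
        rcases List.mem_cons.mp hx with rfl | hx
        · simpa using fun habs => hcur (by simp [habs])
        · exact hacc x hx
    · rw [if_neg hsp] at hw
      exact ih (c :: cur) acc hacc w hw

lemma pvSplit₀_ne_nil (s : List Char) : ∀ w ∈ PySem.Chars.split₀ s, w ≠ [] := by
  intro w hw
  exact pvSplit₀_go_ne_nil s [] [] (by simp) w hw

-- ===== VERDICT =====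
theorem Rename1_spec : Claim_equal_Rename1 := by
  unfold Claim_equal_Rename1
  intro name removeChapter _
  unfold Spec_Rename1 Rename1 Rename1_alt
  simp only
  cases hw : PySem.Chars.split₀ (PySem.Chars.replace (PySem.Chars.replace (PySem.Chars.replace
      (PySem.Chars.replace (PySem.Chars.strip name.toList) ['‘'] ['\'']) ['’'] ['\'']) ['“'] ['"']) ['”'] ['"']) with
  | nil => rfl
  | cons w0 rest =>
    have hne : ∀ x ∈ w0 :: rest, x ≠ [] := by
      rw [← hw]; exact pvSplit₀_ne_nil _
    have hne2 : ∀ x ∈ (if (removeChapter && (PySem.Chars.lower w0 == "chapter".toList) && decide (2 < (w0 :: rest).length)) = true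
        then rest else w0 :: rest), x ≠ [] := by
      split
      · exact fun x hx => hne x (List.mem_cons_of_mem _ hx)
      · exact hne
    have hfold := pvLoop_eq_fold _ [] hne2 (by simp) (by intro i hi; simp at hi)
    simp only [List.nil_append, List.length_nil] at hfold
    simp only [hfold]
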